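-- pv_equiv track=rewrite | github.com/hungson175/AI-teams-controller-public | AI-teams-controller-public/backend/app/services/task_done_listener.py | trim_to_last_input
-- ===== SOURCE A (Python) =====
-- def trim_to_last_input(pane_output: str) -> str:
--     """Trim pane output to only include content from the last user input onwards.
--
--     The Claude Code CLI shows a '>' prompt before each user input.
--     We keep only content from the second-to-last '>' (last user input) onwards.
--     """
--     lines = pane_output.split("\n")
--
--     # Find all line indices that start with '>' (prompt markers)
--     prompt_indices = []
--     for i, line in enumerate(lines):
--         stripped = line.strip()
--         if stripped.startswith(">"):
--             prompt_indices.append(i)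
--
--     # Need at least 2 prompts: last input + current prompt
--     if len(prompt_indices) < 2:
--         return pane_output
--
--     # Second-to-last prompt is where the last input started
--     last_input_idx = prompt_indices[-2]
--
--     # Keep everything from last input onwards
--     return "\n".join(lines[last_input_idx:])
-- ===== SOURCE B (Python) =====
-- def trim_to_last_input(pane_output: str) -> str:
--     """Trim pane output to content from the last user input onwards.
--
--     Scans the lines in reverse, stopping at the second '>' prompt from the end.
--     """
--     lines = pane_output.split("\n")
--     count = 0
--     for i in range(len(lines) - 1, -1, -1):
--         if lines[i].strip().startswith(">"):
--             count += 1
--             if count == 2: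
--                 return "\n".join(lines[i:])
--     return pane_output
-- ===== Notes on version B (the rewrite author's own statement) =====
-- stated objective: alternative
-- what changed: Instead of collecting all prompt-line indices in a forward pass and indexing [-2], B scans the lines in reverse with a counter and stops as soon as the second prompt from the end is found.
import Mathlib
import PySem

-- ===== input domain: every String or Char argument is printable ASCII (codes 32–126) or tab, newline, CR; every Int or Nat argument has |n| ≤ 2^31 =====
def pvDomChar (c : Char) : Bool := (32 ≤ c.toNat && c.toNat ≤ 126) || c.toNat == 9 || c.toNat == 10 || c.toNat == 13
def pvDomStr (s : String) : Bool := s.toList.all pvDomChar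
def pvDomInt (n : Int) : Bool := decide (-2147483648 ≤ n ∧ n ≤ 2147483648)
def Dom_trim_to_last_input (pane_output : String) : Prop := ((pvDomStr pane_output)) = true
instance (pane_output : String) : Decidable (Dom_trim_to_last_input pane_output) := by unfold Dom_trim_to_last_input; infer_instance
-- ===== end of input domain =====

-- B replaces A's forward pass collecting every prompt index (then [-2]) by a reverse scan with a counter that stops at the second prompt from the end; same return value, alternative decomposition.

-- ===== PORT A =====
def trim_to_last_input (pane_output : String) : String :=
  let lines := (PySem.Str.split? pane_output "\n").getD []
  let prompt_indices : List Int := (PySem.List.enumerate lines).foldl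
    (fun acc p => if PySem.Str.startswith (PySem.Str.strip p.2) ">" then acc ++ [p.1] else acc) []
  if prompt_indices.length < 2 then pane_output
  else
    match PySem.List.pyGet? prompt_indices (-2) with
    | some last_input_idx => PySem.Str.join "\n" (PySem.List.slice lines (some last_input_idx) none)
    | none => pane_output   -- unreachable totality guard: length ≥ 2 here

-- ===== PORT B =====
-- reverse loop 'for i in range(len(lines)-1, -1, -1)' over (index, line) pairs, with the counter
def pvRevScan : List (Int × String) → Nat → Option Int
  | [], _ => none
  | (i, l) :: rest, count =>
    if PySem.Str.startswith (PySem.Str.strip l) ">" then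
      if count + 1 == 2 then some i else pvRevScan rest (count + 1)
    else pvRevScan rest count

def trim_to_last_input_alt (pane_output : String) : String :=
  let lines := (PySem.Str.split? pane_output "\n").getD []
  match pvRevScan (PySem.List.enumerate lines).reverse 0 with
  | some i => PySem.Str.join "\n" (PySem.List.slice lines (some i) none)
  | none => pane_output

-- ===== PRECONDITION & SPEC =====
def Spec_trim_to_last_input (pane_output : String) (out : String) : Prop := out = trim_to_last_input_alt pane_output
instance (pane_output : String) (out : String) : Decidable (Spec_trim_to_last_input pane_output out) := by unfold Spec_trim_to_last_input; infer_instance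

-- ===== CLAIM (what is proved, stated in full; the proofs are below) =====
def Claim_equal_trim_to_last_input : Prop := ∀ (pane_output : String), Dom_trim_to_last_input pane_output → Spec_trim_to_last_input pane_output (trim_to_last_input pane_output)

-- ===== LEMMAS AND PROOFS =====

theorem pvRevScan_eq (rl : List (Int × String)) :
    pvRevScan rl 0 = ((rl.filter (fun p => PySem.Str.startswith (PySem.Str.strip p.2) ">")).map (·.1))[1]? ∧
    pvRevScan rl 1 = ((rl.filter (fun p => PySem.Str.startswith (PySem.Str.strip p.2) ">")).map (·.1))[0]? := by
  induction rl with
  | nil => simp [pvRevScan]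
  | cons hd tl ih =>
    obtain ⟨i, l⟩ := hd
    by_cases h : PySem.Str.startswith (PySem.Str.strip l) ">" = true
    · refine ⟨?_, ?_⟩ <;> simp only [pvRevScan, if_pos h, List.filter_cons] <;>
        simp [h, ih.1, ih.2]
    · refine ⟨?_, ?_⟩ <;> simp only [pvRevScan, if_neg h, List.filter_cons] <;>
        simp [h, ih.1, ih.2]

theorem trim_main (lines : List String) :
    (let prompt_indices : List Int := (PySem.List.enumerate lines).foldl
      (fun acc p => if PySem.Str.startswith (PySem.Str.strip p.2) ">" then acc ++ [p.1] else acc) []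
    if prompt_indices.length < 2 then none
    else PySem.List.pyGet? prompt_indices (-2)) =
    pvRevScan (PySem.List.enumerate lines).reverse 0 := by
  have hfold := PySem.List.foldl_append_if
    (l := PySem.List.enumerate lines) (acc := ([] : List Int))
    (p := fun p => PySem.Str.startswith (PySem.Str.strip p.2) ">") (f := (·.1))
  simp only [hfold, List.nil_append]
  set e := PySem.List.enumerate lines with he
  set idxs := (e.filter (fun p => PySem.Str.startswith (PySem.Str.strip p.2) ">")).map (·.1) with hidxs
  have hrev : pvRevScan e.reverse 0 = idxs.reverse[1]? := by
    rw [(pvRevScan_eq e.reverse).1, List.filter_reverse, List.map_reverse]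
  rw [hrev]
  by_cases hlen : idxs.length < 2
  · simp [hlen]
    omega
  · push Not at hlen
    have h2 : 2 ≤ idxs.length := hlen
    rw [if_neg (by omega)]
    rw [PySem.List.pyGet?_neg_ofNat idxs 2 (by omega) h2]
    rw [List.getElem?_reverse (by omega), Nat.sub_sub]

-- ===== VERDICT (by name: the statement is the Claim_ definition above) =====
theorem trim_to_last_input_spec : Claim_equal_trim_to_last_input := by
  intro pane_output _
  unfold Spec_trim_to_last_input trim_to_last_input trim_to_last_input_alt
  have h := trim_main ((PySem.Str.split? pane_output "\n").getD [])
  simp only at h ⊢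
  by_cases hlen :
      ((PySem.List.enumerate ((PySem.Str.split? pane_output "\n").getD [])).foldl
        (fun acc p => if PySem.Str.startswith (PySem.Str.strip p.2) ">" then acc ++ [p.1] else acc) []).length < 2
  · rw [if_pos hlen] at h ⊢
    rw [← h]
  · rw [if_neg hlen] at h ⊢
    rw [← h]
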